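-- pv_equiv track=rewrite | github.com/cfhaiteeh/PG-GSQL | preprocess_data.py | getfa_dic
-- ===== SOURCE A (Python) =====
-- def getfa_dic(ans_info,ans_type,tb_dic,t_id):
--
--   t_ys = ['t1', 't2', 't3', 't4', 't5', 't6', 't7', 't8', 't9', 't10']
--   c_ys = ['c1', 'c2', 'c3', 'c4', 'c5', 'c6', 'c7', 'c8', 'c9', 'c10']
--
--
--   for idx,x in  enumerate(ans_type):
--     if x=='table' or x=='column':
--       if ans_info[idx] not in tb_dic:
--         tb_dic[ans_info[idx]]=t_ys[t_id]
--         t_id+=1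
--
--   new_type=[]
--
--   for idx,x in enumerate(ans_type):
--     if x=='table' or x=='column':
--       if x=='table':
--         new_type.append(tb_dic[ans_info[idx]])
--       else:
--         n_id=t_ys.index(tb_dic[ans_info[idx]])
--         new_type.append(c_ys[n_id])
--
--     else:
--       new_type.append(x)
--   return new_type,tb_dic,t_id
-- ===== SOURCE B (Python) =====
-- def getfa_dic(ans_info, ans_type, tb_dic, t_id):
--     # One fused pass over the tokens (A makes two staged passes); the c_ys
--     # table and the t_ys.index() linear scan are gone: a column label is
--     # derived from the table alias 't<k>' by string surgery as 'c' + alias[1:].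
--     t_ys = ['t1', 't2', 't3', 't4', 't5', 't6', 't7', 't8', 't9', 't10']
--
--     new_type = []
--     for idx, x in enumerate(ans_type):
--         if x == 'table' or x == 'column':
--             k = ans_info[idx]
--             if k not in tb_dic:
--                 tb_dic[k] = t_ys[t_id]
--                 t_id += 1
--             v = tb_dic[k]
--             new_type.append(v if x == 'table' else 'c' + v[1:])
--         else:
--             new_type.append(x)
--     return new_type, tb_dic, t_id
-- ===== Notes on version B (the rewrite author's own statement) =====
-- stated objective: alternative
-- what changed: A's two staged passes (a mutate-the-dict pass, then an output pass that maps each column alias through a t_ys.index linear scan into a parallel c_ys table) become one fused pass that assigns and emits each label inline, and the c_ys table plus the t_ys.index scan are eliminated entirely: a column label is computed from the table alias 't<k>' by string surgery 'c' + alias[1:].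
import Mathlib
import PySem

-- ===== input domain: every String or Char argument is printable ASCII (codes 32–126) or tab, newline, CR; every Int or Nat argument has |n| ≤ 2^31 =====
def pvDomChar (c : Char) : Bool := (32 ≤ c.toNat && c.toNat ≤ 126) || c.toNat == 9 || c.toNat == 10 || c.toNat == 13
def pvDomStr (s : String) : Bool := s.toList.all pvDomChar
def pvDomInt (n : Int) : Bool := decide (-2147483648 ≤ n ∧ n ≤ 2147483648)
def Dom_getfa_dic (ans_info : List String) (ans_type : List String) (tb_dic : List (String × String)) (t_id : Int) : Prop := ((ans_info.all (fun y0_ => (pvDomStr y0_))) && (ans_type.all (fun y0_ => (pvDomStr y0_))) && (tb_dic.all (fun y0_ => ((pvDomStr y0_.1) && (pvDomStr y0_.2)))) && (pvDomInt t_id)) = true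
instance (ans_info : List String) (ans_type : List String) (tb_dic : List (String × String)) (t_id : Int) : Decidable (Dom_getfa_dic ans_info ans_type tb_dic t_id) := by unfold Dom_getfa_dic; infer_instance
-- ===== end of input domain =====

-- B replaces A's two staged passes by one fused pass threading the alias counter, and drops the
-- c_ys table and the t_ys.index scan (column label = "c" + alias[1:]); equivalence is about the
-- RETURN value (in Python both versions mutate the tb_dic dict in the same way).

-- the literal alias table shared by both Pythons (B has no c_ys)
def pvTYs : List String := ["t1", "t2", "t3", "t4", "t5", "t6", "t7", "t8", "t9", "t10"]
def pvCYs : List String := ["c1", "c2", "c3", "c4", "c5", "c6", "c7", "c8", "c9", "c10"]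

-- ===== PORT A =====
def getfa_dic (ans_info : List String) (ans_type : List String) (tb_dic : List (String × String)) (t_id : Int) : List String × (List (String × String)) × Int :=
  -- first loop: walk enumerate(ans_type), inserting unseen table/column tokens with the next alias
  let s := (PySem.List.enumerate ans_type).foldl
    (fun (s : PySem.Dict String String × Int) p =>
      if p.2 == "table" || p.2 == "column" then
        let k := (PySem.List.pyGet? ans_info p.1).getD ""
        if !(s.1.contains k) then
          (s.1.insert k ((PySem.List.pyGet? pvTYs s.2).getD ""), s.2 + 1)
        else s
      else s)
    (PySem.Dict.ofList tb_dic, t_id)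
  -- second loop: build new_type by appending per token
  let new_type := (PySem.List.enumerate ans_type).foldl
    (fun acc p =>
      if p.2 == "table" || p.2 == "column" then
        let v := (s.1.get? ((PySem.List.pyGet? ans_info p.1).getD "")).getD ""
        if p.2 == "table" then acc ++ [v]
        else
          let n_id := ((PySem.List.index? pvTYs v).getD 0 : Nat)
          acc ++ [PySem.List.pyGetD pvCYs (n_id : Int) ""]
      else acc ++ [p.2])
    []
  (new_type, s.1.items, s.2)

-- ===== PORT B =====
-- 'c' + v[1:] (string concatenation of a literal head with a Python slice)
def pvCLabel (v : String) : String := "c" ++ PySem.Str.slice v (some 1) none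

def getfa_dic_alt (ans_info : List String) (ans_type : List String) (tb_dic : List (String × String)) (t_id : Int) : List String × (List (String × String)) × Int :=
  -- single fused loop: state = (new_type, tb_dic, t_id)
  let r := (PySem.List.enumerate ans_type).foldl
    (fun (s : List String × PySem.Dict String String × Int) p =>
      if p.2 == "table" || p.2 == "column" then
        let k := (PySem.List.pyGet? ans_info p.1).getD ""
        let s2 := if !(s.2.1.contains k) then
            (s.2.1.insert k ((PySem.List.pyGet? pvTYs s.2.2).getD ""), s.2.2 + 1)
          else s.2
        let v := (s2.1.get? k).getD ""
        (s.1 ++ [if p.2 == "table" then v else pvCLabel v], s2)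
      else (s.1 ++ [p.2], s.2))
    ([], PySem.Dict.ofList tb_dic, t_id)
  (r.1, r.2.1.items, r.2.2)

-- ===== PRECONDITION & SPEC =====
-- helpers for Pre_ (shape properties of the input, no port code):
-- the keys of the relevant tokens, and the dedup-against-the-dict fold
def pvKeysOf (ans_info : List String) (l : List (Int × String)) : List String :=
  (l.filter (fun p => p.2 == "table" || p.2 == "column")).map
    (fun p => (PySem.List.pyGet? ans_info p.1).getD "")

def pvFA (d : PySem.Dict String String) (acc : List String) (ks : List String) : List String :=
  ks.foldl (fun acc k => if !(d.contains k) && !(acc.contains k) then acc ++ [k] else acc) acc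

-- the distinct relevant tokens not already mapped
def pvFreshKeys (ans_info : List String) (ans_type : List String) (tb_dic : List (String × String)) : List String :=
  pvFA (PySem.Dict.ofList tb_dic) [] (pvKeysOf ans_info (PySem.List.enumerate ans_type))

-- Pre_ excludes exactly the inputs on which the Python A raises: a table/column token past the end of
-- ans_info (IndexError), more fresh tokens than alias slots t_ys[t_id..] provides (IndexError), and a
-- column token whose pre-existing dict value is not one of the t-aliases (ValueError in t_ys.index).
def Pre_getfa_dic (ans_info : List String) (ans_type : List String) (tb_dic : List (String × String)) (t_id : Int) : Prop :=
  (∀ p ∈ PySem.List.enumerate ans_type, (p.2 = "table" ∨ p.2 = "column") → p.1 < (ans_info.length : Int)) ∧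
  (pvFreshKeys ans_info ans_type tb_dic = [] ∨
    (-10 ≤ t_id ∧ t_id + ((pvFreshKeys ans_info ans_type tb_dic).length : Int) ≤ 10)) ∧
  (∀ p ∈ PySem.List.enumerate ans_type, p.2 = "column" →
    ∀ v ∈ (PySem.Dict.ofList tb_dic).get? ((PySem.List.pyGet? ans_info p.1).getD ""), v ∈ pvTYs)
instance (ans_info : List String) (ans_type : List String) (tb_dic : List (String × String)) (t_id : Int) : Decidable (Pre_getfa_dic ans_info ans_type tb_dic t_id) := by unfold Pre_getfa_dic; infer_instance

def pvWitness_getfa_dic : List String × List String × (List (String × String)) × Int :=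
  (["person", "person", "name"], ["table", "op", "column"], [("city", "t1")], 1)

def Spec_getfa_dic (ans_info : List String) (ans_type : List String) (tb_dic : List (String × String)) (t_id : Int) (out : List String × (List (String × String)) × Int) : Prop := out = getfa_dic_alt ans_info ans_type tb_dic t_id
instance (ans_info : List String) (ans_type : List String) (tb_dic : List (String × String)) (t_id : Int) (out : List String × (List (String × String)) × Int) : Decidable (Spec_getfa_dic ans_info ans_type tb_dic t_id out) := by unfold Spec_getfa_dic; infer_instance

-- ===== CLAIM =====
def Claim_equal_getfa_dic : Prop := ∀ (ans_info : List String) (ans_type : List String) (tb_dic : List (String × String)) (t_id : Int), Dom_getfa_dic ans_info ans_type tb_dic t_id → Pre_getfa_dic ans_info ans_type tb_dic t_id → Spec_getfa_dic ans_info ans_type tb_dic t_id (getfa_dic ans_info ans_type tb_dic t_id)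

-- ===== LEMMAS AND PROOFS =====
-- A's first-pass step function (definitionally the lambda in the port of A)
def pvF1 (ans_info : List String) (s : PySem.Dict String String × Int) (p : Int × String) : PySem.Dict String String × Int :=
  if p.2 == "table" || p.2 == "column" then
    let k := (PySem.List.pyGet? ans_info p.1).getD ""
    if !(s.1.contains k) then
      (s.1.insert k ((PySem.List.pyGet? pvTYs s.2).getD ""), s.2 + 1)
    else s
  else s

-- A's second-pass per-token value, read against the final dict dF
def pvOutF (ans_info : List String) (dF : PySem.Dict String String) (p : Int × String) : String :=
  if p.2 == "table" || p.2 == "column" then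
    let v := (dF.get? ((PySem.List.pyGet? ans_info p.1).getD "")).getD ""
    if p.2 == "table" then v
    else PySem.List.pyGetD pvCYs (((PySem.List.index? pvTYs v).getD 0 : Nat) : Int) ""
  else p.2

-- every insert performed by the first pass finds an alias slot (the counter stays in t_ys's range)
def pvOK (ans_info : List String) : List (Int × String) → PySem.Dict String String → Int → Prop
  | [], _, _ => True
  | p :: rest, d, t =>
    if p.2 == "table" || p.2 == "column" then
      let k := (PySem.List.pyGet? ans_info p.1).getD ""
      if d.contains k then pvOK ans_info rest d t
      else (-10 ≤ t ∧ t < 10) ∧ pvOK ans_info rest (d.insert k ((PySem.List.pyGet? pvTYs t).getD "")) (t + 1)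
    else pvOK ans_info rest d t

-- recursive model of B's fused loop (state threaded structurally; proof helper)
def pvGoB (ans_info : List String) : List (Int × String) → PySem.Dict String String → Int → List String × PySem.Dict String String × Int
  | [], d, t => ([], d, t)
  | p :: rest, d, t =>
    if p.2 == "table" || p.2 == "column" then
      let k := (PySem.List.pyGet? ans_info p.1).getD ""
      let s := if !(d.contains k) then (d.insert k ((PySem.List.pyGet? pvTYs t).getD ""), t + 1) else (d, t)
      let v := (s.1.get? k).getD ""
      let label := if p.2 == "table" then v else pvCLabel v
      let r := pvGoB ans_info rest s.1 s.2
      (label :: r.1, r.2)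
    else
      let r := pvGoB ans_info rest d t
      (p.2 :: r.1, r.2)

-- B's foldl with an output accumulator is pvGoB
theorem pvFoldB_eq (ans_info : List String) (l : List (Int × String)) :
    ∀ (acc : List String) (d : PySem.Dict String String) (t : Int),
    l.foldl
      (fun (s : List String × PySem.Dict String String × Int) p =>
        if p.2 == "table" || p.2 == "column" then
          let k := (PySem.List.pyGet? ans_info p.1).getD ""
          let s2 := if !(s.2.1.contains k) then
              (s.2.1.insert k ((PySem.List.pyGet? pvTYs s.2.2).getD ""), s.2.2 + 1)
            else s.2
          let v := (s2.1.get? k).getD ""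
          (s.1 ++ [if p.2 == "table" then v else pvCLabel v], s2)
        else (s.1 ++ [p.2], s.2)) (acc, d, t)
    = (acc ++ (pvGoB ans_info l d t).1, (pvGoB ans_info l d t).2) := by
  induction l with
  | nil => intro acc d t; simp [pvGoB]
  | cons p rest ih =>
    intro acc d t
    by_cases hrel : (p.2 == "table" || p.2 == "column") = true
    · by_cases hc : d.contains ((PySem.List.pyGet? ans_info p.1).getD "") = true
      · simp only [List.foldl_cons, pvGoB, hrel, if_true, hc, Bool.not_true, Bool.false_eq_true, if_false]
        rw [ih]; simp
      · have hcf : d.contains ((PySem.List.pyGet? ans_info p.1).getD "") = false := by simpa using hc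
        simp only [List.foldl_cons, pvGoB, hrel, if_true, hcf, Bool.not_false, if_true]
        rw [ih]; simp
    · simp only [List.foldl_cons, pvGoB, hrel, Bool.false_eq_true, if_false]
      rw [ih]; simp

-- the fold only ever ADDS bindings: existing ones survive to the final dict
theorem pvFold1_mono (ans_info : List String) (l : List (Int × String)) :
    ∀ (d : PySem.Dict String String) (t : Int) (k : String) (v : String),
    d.get? k = some v → ((l.foldl (pvF1 ans_info) (d, t)).1).get? k = some v := by
  induction l with
  | nil => intro d t k v h; exact h
  | cons p rest ih =>
    intro d t k v h
    simp only [List.foldl_cons]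
    by_cases hrel : (p.2 == "table" || p.2 == "column") = true
    · by_cases hc : d.contains ((PySem.List.pyGet? ans_info p.1).getD "") = true
      · have hstep : pvF1 ans_info (d, t) p = (d, t) := by
          unfold pvF1; simp [hrel, hc]
        rw [hstep]; exact ih d t k v h
      · have hstep : pvF1 ans_info (d, t) p
            = (d.insert ((PySem.List.pyGet? ans_info p.1).getD "") ((PySem.List.pyGet? pvTYs t).getD ""), t + 1) := by
          unfold pvF1; simp [hrel, hc]
        rw [hstep]
        have hne : k ≠ (PySem.List.pyGet? ans_info p.1).getD "" := by
          intro he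
          have hck : d.contains k = true := by
            rw [PySem.Dict.contains_eq_isSome_get?, h]; rfl
          rw [he] at hck; exact absurd hck (by simp [hc])
        exact ih _ _ k v (by rw [PySem.Dict.get?_insert_of_ne _ _ hne]; exact h)
    · have hstep : pvF1 ans_info (d, t) p = (d, t) := by unfold pvF1; simp [hrel]
      rw [hstep]; exact ih d t k v h

-- a successful t_ys lookup yields a t-alias
theorem pvTYs_get_mem (t : Int) (h1 : -10 ≤ t) (h2 : t < 10) :
    (PySem.List.pyGet? pvTYs t).getD "" ∈ pvTYs := by
  interval_cases t <;> decide

-- for a t-alias, "c" + v[1:] is exactly c_ys[t_ys.index(v)]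
theorem pvCLabel_eq (v : String) (hv : v ∈ pvTYs) :
    pvCLabel v = PySem.List.pyGetD pvCYs (((PySem.List.index? pvTYs v).getD 0 : Nat) : Int) "" := by
  fin_cases hv <;> decide

-- MAIN: the fused recursive pass equals (A's second pass against the final dict, A's first-pass state)
theorem pvGoB_eq (ans_info : List String) (l : List (Int × String)) :
    ∀ (d : PySem.Dict String String) (t : Int),
    pvOK ans_info l d t →
    (∀ p ∈ l, p.2 = "column" →
      ∀ v, d.get? ((PySem.List.pyGet? ans_info p.1).getD "") = some v → v ∈ pvTYs) →
    pvGoB ans_info l d t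
      = (l.map (pvOutF ans_info (l.foldl (pvF1 ans_info) (d, t)).1), l.foldl (pvF1 ans_info) (d, t)) := by
  induction l with
  | nil => intro d t _ _; rfl
  | cons p rest ih =>
    intro d t hok hcol
    have hcol' := fun q hq => hcol q (List.mem_cons_of_mem p hq)
    by_cases hrel : (p.2 == "table" || p.2 == "column") = true
    · by_cases hc : d.contains ((PySem.List.pyGet? ans_info p.1).getD "") = true
      · -- key already present: no insert, read the existing value
        have hstep : pvF1 ans_info (d, t) p = (d, t) := by unfold pvF1; simp [hrel, hc]
        have hok' : pvOK ans_info rest d t := by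
          unfold pvOK at hok; simp only [hrel, if_true, hc] at hok; exact hok
        obtain ⟨v0, hv0⟩ : ∃ v0, d.get? ((PySem.List.pyGet? ans_info p.1).getD "") = some v0 := by
          rw [PySem.Dict.contains_eq_isSome_get?] at hc
          exact Option.isSome_iff_exists.mp hc
        have hfin := pvFold1_mono ans_info rest d t _ v0 hv0
        unfold pvGoB
        simp only [hrel, if_true, hc, Bool.not_true, Bool.false_eq_true, if_false]
        rw [ih d t hok' hcol']
        simp only [List.foldl_cons, hstep, List.map_cons]
        refine congrArg₂ Prod.mk ?_ rfl
        refine congrArg₂ List.cons ?_ rfl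
        by_cases ht : (p.2 == "table") = true
        · unfold pvOutF; simp [hrel, ht, hfin, hv0]
        · have hco : p.2 = "column" := by
            rcases Bool.or_eq_true_iff.mp hrel with h | h
            · exact absurd h ht
            · exact beq_iff_eq.mp h
          have hmem : v0 ∈ pvTYs := hcol p List.mem_cons_self hco v0 hv0
          have hcb : (p.2 == "column") = true := beq_iff_eq.mpr hco
          unfold pvOutF
          simp [ht, hcb, hfin, hv0, pvCLabel_eq v0 hmem]
      · -- fresh key: insert the next alias, then recurse on the grown dict
        set k := (PySem.List.pyGet? ans_info p.1).getD "" with hk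
        set val := (PySem.List.pyGet? pvTYs t).getD "" with hval
        have hcf : d.contains k = false := by simpa using hc
        have hok' : (-10 ≤ t ∧ t < 10) ∧ pvOK ans_info rest (d.insert k val) (t + 1) := by
          unfold pvOK at hok
          rw [← hk] at hok
          rw [← hval] at hok
          simp only [hrel, if_true, hcf, Bool.false_eq_true, if_false] at hok; exact hok
        have hvmem : val ∈ pvTYs := pvTYs_get_mem t hok'.1.1 hok'.1.2
        have hstep : pvF1 ans_info (d, t) p = (d.insert k val, t + 1) := by
          unfold pvF1; simp [hrel, ← hk, ← hval, hcf]
        have hcol'' : ∀ q ∈ rest, q.2 = "column" →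
            ∀ v, (d.insert k val).get? ((PySem.List.pyGet? ans_info q.1).getD "") = some v → v ∈ pvTYs := by
          intro q hq hqc v hv
          by_cases he : (PySem.List.pyGet? ans_info q.1).getD "" = k
          · rw [he, PySem.Dict.get?_insert_self] at hv
            cases hv; exact hvmem
          · rw [PySem.Dict.get?_insert_of_ne _ _ he] at hv
            exact hcol' q hq hqc v hv
        have hself : (d.insert k val).get? k = some val := PySem.Dict.get?_insert_self _ _ _
        have hfin := pvFold1_mono ans_info rest (d.insert k val) (t + 1) k val hself
        unfold pvGoB
        simp only [hrel, if_true, ← hk, ← hval, hcf, Bool.not_false, if_true]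
        rw [ih (d.insert k val) (t + 1) hok'.2 hcol'']
        simp only [List.foldl_cons, hstep, List.map_cons]
        refine congrArg₂ Prod.mk ?_ rfl
        refine congrArg₂ List.cons ?_ rfl
        by_cases ht : (p.2 == "table") = true
        · unfold pvOutF; simp [hrel, ht, ← hk, hfin, hself]
        · have hco : p.2 = "column" := by
            rcases Bool.or_eq_true_iff.mp hrel with h | h
            · exact absurd h ht
            · exact beq_iff_eq.mp h
          have hcb : (p.2 == "column") = true := beq_iff_eq.mpr hco
          unfold pvOutF
          simp [← hk, ht, hcb, hfin, hself, pvCLabel_eq val hvmem]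
    · have hstep : pvF1 ans_info (d, t) p = (d, t) := by unfold pvF1; simp [hrel]
      have hok' : pvOK ans_info rest d t := by
        unfold pvOK at hok; simp only [hrel, Bool.false_eq_true, if_false] at hok; exact hok
      unfold pvGoB
      simp only [hrel, Bool.false_eq_true, if_false]
      rw [ih d t hok' hcol']
      simp only [List.foldl_cons, hstep, List.map_cons]
      refine congrArg₂ Prod.mk ?_ rfl
      refine congrArg₂ List.cons ?_ rfl
      unfold pvOutF; simp [hrel]

-- pvFA is unchanged by inserting a key already in the accumulator
theorem pvFA_insert_mem (ks : List String) : ∀ (d : PySem.Dict String String) (acc : List String) (k v : String),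
    k ∈ acc → pvFA (d.insert k v) acc ks = pvFA d acc ks := by
  induction ks with
  | nil => intro d acc k v _; rfl
  | cons k' ks ih =>
    intro d acc k v hk
    unfold pvFA
    simp only [List.foldl_cons]
    have hstep : (if (!(d.insert k v).contains k' && !acc.contains k') = true then acc ++ [k'] else acc)
        = (if (!d.contains k' && !acc.contains k') = true then acc ++ [k'] else acc) := by
      by_cases he : k' = k
      · subst he
        have hacc : acc.contains k' = true := by simp [List.contains_eq_mem, hk]
        simp only [hacc, Bool.not_true, Bool.and_false, Bool.false_eq_true, if_false]
      · rw [PySem.Dict.contains_insert]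
        simp [he]
    rw [hstep]
    by_cases hc : (!d.contains k' && !acc.contains k') = true
    · rw [if_pos hc]
      exact ih d (acc ++ [k']) k v (List.mem_append_left _ hk)
    · rw [if_neg hc]
      exact ih d acc k v hk

-- a prefix of already-contained keys passes through pvFA
theorem pvFA_pre (ks : List String) : ∀ (d : PySem.Dict String String) (pre acc : List String),
    (∀ x ∈ pre, d.contains x = true) → pvFA d (pre ++ acc) ks = pre ++ pvFA d acc ks := by
  induction ks with
  | nil => intro d pre acc _; rfl
  | cons k ks ih =>
    intro d pre acc hpre
    unfold pvFA
    simp only [List.foldl_cons]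
    by_cases hd : d.contains k = true
    · simp only [hd, Bool.not_true, Bool.false_and, Bool.false_eq_true, if_false]
      exact ih d pre acc hpre
    · have hknp : k ∉ pre := fun hmem => hd (hpre k hmem)
      have h1 : pre.contains k = false := by simp [List.contains_eq_mem, hknp]
      have hpk : (pre ++ acc).contains k = acc.contains k := by
        rw [List.contains_append, h1, Bool.false_or]
      rw [hpk]
      by_cases hc : (!d.contains k && !acc.contains k) = true
      · rw [if_pos hc, if_pos hc, List.append_assoc]
        exact ih d pre (acc ++ [k]) hpre
      · rw [if_neg hc, if_neg hc]
        exact ih d pre acc hpre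

-- the counter-range side of Pre_ implies pvOK along the whole pass
theorem pvOK_of_fresh (ans_info : List String) (l : List (Int × String)) :
    ∀ (d : PySem.Dict String String) (t : Int),
    (pvFA d [] (pvKeysOf ans_info l) = [] ∨
      (-10 ≤ t ∧ t + ((pvFA d [] (pvKeysOf ans_info l)).length : Int) ≤ 10)) →
    pvOK ans_info l d t := by
  induction l with
  | nil => intro d t _; trivial
  | cons p rest ih =>
    intro d t hfr
    by_cases hrel : (p.2 == "table" || p.2 == "column") = true
    · set k := (PySem.List.pyGet? ans_info p.1).getD "" with hk
      have hkeys : pvKeysOf ans_info (p :: rest) = k :: pvKeysOf ans_info rest := by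
        unfold pvKeysOf; simp [List.filter_cons, hrel, hk]
      by_cases hc : d.contains k = true
      · have hsame : pvFA d [] (pvKeysOf ans_info (p :: rest)) = pvFA d [] (pvKeysOf ans_info rest) := by
          rw [hkeys]; unfold pvFA; simp [List.foldl_cons, hc]
        unfold pvOK
        simp only [hrel, if_true, ← hk, hc, if_true]
        exact ih d t (by rw [← hsame]; exact hfr)
      · set val := (PySem.List.pyGet? pvTYs t).getD "" with hval
        have hcf : d.contains k = false := by simpa using hc
        have hfa : pvFA d [] (pvKeysOf ans_info (p :: rest))
            = k :: pvFA (d.insert k val) [] (pvKeysOf ans_info rest) := by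
          rw [hkeys]
          have h1 : pvFA d [] (k :: pvKeysOf ans_info rest) = pvFA d [k] (pvKeysOf ans_info rest) := by
            unfold pvFA; simp [List.foldl_cons, hc]
          rw [h1, ← pvFA_insert_mem (pvKeysOf ans_info rest) d [k] k val (by simp)]
          have h2 := pvFA_pre (pvKeysOf ans_info rest) (d.insert k val) [k] []
            (by intro x hx; simp at hx; subst hx; exact PySem.Dict.contains_insert_self _ _ _)
          simpa using h2
        rcases hfr with hnil | ⟨hlo, hhi⟩
        · rw [hfa] at hnil; exact absurd hnil (List.cons_ne_nil _ _)
        · rw [hfa] at hhi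
          simp only [List.length_cons] at hhi
          have hlen : (0 : Int) ≤ ((pvFA (d.insert k val) [] (pvKeysOf ans_info rest)).length : Int) := by positivity
          unfold pvOK
          simp only [hrel, if_true, ← hk, hcf, Bool.false_eq_true, if_false]
          refine ⟨⟨hlo, by push_cast at hhi ⊢; omega⟩, ?_⟩
          refine ih (d.insert k val) (t + 1) (Or.inr ⟨by omega, ?_⟩)
          push_cast at hhi ⊢; omega
    · have hkeys : pvKeysOf ans_info (p :: rest) = pvKeysOf ans_info rest := by
        unfold pvKeysOf; simp [List.filter_cons, hrel]
      unfold pvOK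
      simp only [hrel, Bool.false_eq_true, if_false]
      exact ih d t (by rw [← hkeys]; exact hfr)

-- A's second loop (foldl with appends) is the map of pvOutF
theorem pvOutFold_eq (ans_info : List String) (dF : PySem.Dict String String) (l : List (Int × String)) :
    l.foldl
      (fun acc p =>
        if p.2 == "table" || p.2 == "column" then
          let v := (dF.get? ((PySem.List.pyGet? ans_info p.1).getD "")).getD ""
          if p.2 == "table" then acc ++ [v]
          else
            let n_id := ((PySem.List.index? pvTYs v).getD 0 : Nat)
            acc ++ [PySem.List.pyGetD pvCYs (n_id : Int) ""]
        else acc ++ [p.2]) []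
    = l.map (pvOutF ans_info dF) := by
  have hbody : (fun acc p =>
        if p.2 == "table" || p.2 == "column" then
          let v := (dF.get? ((PySem.List.pyGet? ans_info p.1).getD "")).getD ""
          if p.2 == "table" then acc ++ [v]
          else
            let n_id := ((PySem.List.index? pvTYs v).getD 0 : Nat)
            acc ++ [PySem.List.pyGetD pvCYs (n_id : Int) ""]
        else acc ++ [p.2])
      = (fun (acc : List String) (p : Int × String) => acc ++ [pvOutF ans_info dF p]) := by
    funext acc p
    unfold pvOutF
    by_cases hrel : (p.2 == "table" || p.2 == "column") = true
    · by_cases ht : (p.2 == "table") = true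
      · simp [hrel, ht]
      · simp [hrel, ht]
        split_ifs <;> rfl
    · simp [hrel]
  rw [hbody, PySem.List.foldl_append_singleton_eq_map]
  simp

-- ===== VERDICT (by name: the statement is the Claim_ definition above) =====
theorem getfa_dic_spec : Claim_equal_getfa_dic := by
  intro ans_info ans_type tb_dic t_id _ hpre
  obtain ⟨_, hfr, hcol⟩ := hpre
  unfold Spec_getfa_dic getfa_dic getfa_dic_alt
  simp only []
  have hF1 : (fun (s : PySem.Dict String String × Int) (p : Int × String) =>
      if p.2 == "table" || p.2 == "column" then
        let k := (PySem.List.pyGet? ans_info p.1).getD ""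
        if !(s.1.contains k) then
          (s.1.insert k ((PySem.List.pyGet? pvTYs s.2).getD ""), s.2 + 1)
        else s
      else s) = pvF1 ans_info := rfl
  rw [hF1, pvOutFold_eq]
  have hok : pvOK ans_info (PySem.List.enumerate ans_type) (PySem.Dict.ofList tb_dic) t_id :=
    pvOK_of_fresh ans_info (PySem.List.enumerate ans_type) (PySem.Dict.ofList tb_dic) t_id hfr
  have hcol' : ∀ p ∈ PySem.List.enumerate ans_type, p.2 = "column" →
      ∀ v, (PySem.Dict.ofList tb_dic).get? ((PySem.List.pyGet? ans_info p.1).getD "") = some v → v ∈ pvTYs := by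
    intro p hp hpc v hv
    exact hcol p hp hpc v (by simpa using hv)
  rw [pvFoldB_eq, pvGoB_eq ans_info (PySem.List.enumerate ans_type) (PySem.Dict.ofList tb_dic) t_id hok hcol']
  simp
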